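-- pv_equiv track=rewrite | github.com/EchEdward/Vive | Kat_lists.py | KL_metki
-- ===== SOURCE A (Python) =====
-- def KL_metki(sp,resize=None):
--     if resize != None:
--         s = []
--         r = list(resize.keys())
--         for i in range(len(r)):
--             s.append([])
--             for j in resize[r[i]]:
--                 s[i]+=sp[j]
--     else:
--         s = sp
--
--     s_d = []
--
--     for i in range(len(s)):
--         s_d.append({})
--         for j in range(len(s[i])):
--
--             if s[i][j][0] not in s_d[i]:
--                 if s[i][j][2]:
--                     s_d[i][s[i][j][0]] = "L"
--             else:
--                 if s_d[i][s[i][j][0]] == "R" and s[i][j][2]: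
--                     s_d[i][s[i][j][0]] = "LR"
--
--             if s[i][j][1] not in s_d[i]:
--                 if s[i][j][3]:
--                     s_d[i][s[i][j][1]] = "R"
--             else:
--                 if s_d[i][s[i][j][1]] == "L" and s[i][j][3]:
--                     s_d[i][s[i][j][1]] = "LR"
--
--     rez =[list(i.items()) for i in s_d]
--
--     return rez
-- ===== SOURCE B (Python) =====
-- def KL_metki(sp, resize=None):
--     # staged decomposition: flagged-key event stream + two membership sets,
--     # then one derivation pass over the first-occurrence dedup of the events
--     if resize is not None:
--         s = [[t for j in js for t in sp[j]] for js in resize.values()]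
--     else:
--         s = sp
--     rez = []
--     for sub in s:
--         events = [k for (a, b, fl, fr) in sub
--                   for k in (([a] if fl else []) + ([b] if fr else []))]
--         lefts = {a for (a, b, fl, fr) in sub if fl}
--         rights = {b for (a, b, fl, fr) in sub if fr}
--         rez.append([(k, ("L" if k in lefts else "") + ("R" if k in rights else ""))
--                     for k in dict.fromkeys(events)])
--     return rez
-- ===== Notes on version B (the rewrite author's own statement) =====
-- stated objective: simpler
-- what changed: B replaces A's single stateful pass with value-dependent L/R/LR upgrade branches by staged passes: it flattens each sublist into a flagged-key event stream, takes its first-occurrence dedup (dict.fromkeys) for the key order, builds two membership sets of keys seen flagged-left and flagged-right, and derives each label by string concatenation; the resized lists come from resize.values() by a flat comprehension instead of indexed append loops.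
import Mathlib
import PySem

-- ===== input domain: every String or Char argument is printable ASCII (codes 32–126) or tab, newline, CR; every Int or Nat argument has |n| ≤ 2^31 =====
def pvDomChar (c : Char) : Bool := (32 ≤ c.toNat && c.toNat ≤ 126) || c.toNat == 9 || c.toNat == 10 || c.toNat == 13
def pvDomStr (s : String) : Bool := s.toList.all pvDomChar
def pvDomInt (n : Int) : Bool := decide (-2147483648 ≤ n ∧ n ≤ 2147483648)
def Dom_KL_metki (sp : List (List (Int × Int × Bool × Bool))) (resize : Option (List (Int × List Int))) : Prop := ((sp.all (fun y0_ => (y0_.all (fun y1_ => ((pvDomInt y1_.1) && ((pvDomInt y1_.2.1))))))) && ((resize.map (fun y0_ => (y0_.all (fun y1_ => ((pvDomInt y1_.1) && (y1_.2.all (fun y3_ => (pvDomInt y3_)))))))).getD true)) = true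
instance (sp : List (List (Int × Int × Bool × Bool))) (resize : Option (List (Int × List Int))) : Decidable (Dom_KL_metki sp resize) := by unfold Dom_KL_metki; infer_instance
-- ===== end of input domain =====

-- B replaces A's single stateful pass with value-dependent "L"/"R"/"LR" upgrade branches by
-- staged passes: a flagged-key event stream deduplicated to first occurrences for the order,
-- plus two membership sets from which each label is derived by string concatenation
-- (objective: simpler decomposition, same asymptotic cost).

-- ===== PORT A =====
-- literal transcription of A's first if/else block (left endpoint of the tuple)
def pvStepA_L (d : PySem.Dict Int String) (k : Int) (fl : Bool) : PySem.Dict Int String :=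
  if d.contains k = false then
    (if fl then d.insert k "L" else d)
  else
    (if d.getD k "" = "R" ∧ fl = true then d.insert k "LR" else d)

-- literal transcription of A's second if/else block (right endpoint of the tuple)
def pvStepA_R (d : PySem.Dict Int String) (k : Int) (fr : Bool) : PySem.Dict Int String :=
  if d.contains k = false then
    (if fr then d.insert k "R" else d)
  else
    (if d.getD k "" = "L" ∧ fr = true then d.insert k "LR" else d)

-- sp[j] can raise IndexError; Pre_ guarantees the index is in range, so `.getD []` is never taken
def KL_metki (sp : List (List (Int × Int × Bool × Bool))) (resize : Option (List (Int × List Int))) : List (List (Int × String)) :=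
  let s : List (List (Int × Int × Bool × Bool)) :=
    match resize with
    | some rl =>
        let rd : PySem.Dict Int (List Int) := PySem.Dict.ofList rl
        let r : List Int := rd.keys
        r.foldl (fun s k =>
          s ++ [(rd.getD k []).foldl (fun si j => si ++ (PySem.List.pyGet? sp j).getD []) []]) []
    | none => sp
  let s_d : List (PySem.Dict Int String) :=
    s.foldl (fun sd l =>
      sd ++ [l.foldl (fun d t => pvStepA_R (pvStepA_L d t.1 t.2.2.1) t.2.1 t.2.2.2) PySem.Dict.empty]) []
  s_d.map (fun d => d.items)

-- ===== PORT B =====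
def pvLabel (lefts rights : PySem.Set Int) (k : Int) : String :=
  (if lefts.contains k then "L" else "") ++ (if rights.contains k then "R" else "")

def KL_metki_alt (sp : List (List (Int × Int × Bool × Bool))) (resize : Option (List (Int × List Int))) : List (List (Int × String)) :=
  let s : List (List (Int × Int × Bool × Bool)) :=
    match resize with
    | some rl =>
        (PySem.Dict.ofList rl).values.map
          (fun js => js.flatMap (fun j => (PySem.List.pyGet? sp j).getD []))
    | none => sp
  s.map (fun sub =>
    let events : List Int :=
      sub.flatMap (fun t => (if t.2.2.1 then [t.1] else []) ++ (if t.2.2.2 then [t.2.1] else []))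
    let lefts : PySem.Set Int :=
      PySem.Set.ofList (sub.filterMap (fun t => if t.2.2.1 then some t.1 else none))
    let rights : PySem.Set Int :=
      PySem.Set.ofList (sub.filterMap (fun t => if t.2.2.2 then some t.2.1 else none))
    (PySem.List.dedup events).map (fun k => (k, pvLabel lefts rights k)))

-- ===== PRECONDITION & SPEC =====
-- Pre_ excludes exactly the inputs on which A raises IndexError: a sublist index in some
-- resize entry outside range(-len(sp), len(sp)).
def Pre_KL_metki (sp : List (List (Int × Int × Bool × Bool))) (resize : Option (List (Int × List Int))) : Prop :=
  ∀ p ∈ resize.getD [], ∀ j ∈ p.2, PySem.Raise.InRange sp.length j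

instance (sp : List (List (Int × Int × Bool × Bool))) (resize : Option (List (Int × List Int))) : Decidable (Pre_KL_metki sp resize) := by unfold Pre_KL_metki; infer_instance

def pvWitness_KL_metki : (List (List (Int × Int × Bool × Bool))) × (Option (List (Int × List Int))) :=
  ([[(1, 2, true, false)], [(2, 3, true, true)]], some [(5, [0, 1]), (7, [1])])

def Spec_KL_metki (sp : List (List (Int × Int × Bool × Bool))) (resize : Option (List (Int × List Int))) (out : List (List (Int × String))) : Prop := out = KL_metki_alt sp resize
instance (sp : List (List (Int × Int × Bool × Bool))) (resize : Option (List (Int × List Int))) (out : List (List (Int × String))) : Decidable (Spec_KL_metki sp resize out) := by unfold Spec_KL_metki; infer_instance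

-- ===== CLAIM (what is proved, stated in full; the proofs are below) =====
def Claim_equal_KL_metki : Prop := ∀ (sp : List (List (Int × Int × Bool × Bool))) (resize : Option (List (Int × List Int))), Dom_KL_metki sp resize → Pre_KL_metki sp resize → Spec_KL_metki sp resize (KL_metki sp resize)

-- ===== LEMMAS AND PROOFS =====

-- the flagged-occurrence events of one tuple, in A's processing order (left before right)
def pvEvts (t : Int × Int × Bool × Bool) : List (Int × Bool) :=
  (if t.2.2.1 then [(t.1, false)] else []) ++ (if t.2.2.2 then [(t.2.1, true)] else [])

def pvTev (l : List (Int × Int × Bool × Bool)) : List (Int × Bool) := l.flatMap pvEvts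

-- the label a key has after the event list p
def pvLabP (p : List (Int × Bool)) (k : Int) : String :=
  (if (k, false) ∈ p then "L" else "") ++ (if (k, true) ∈ p then "R" else "")

-- the canonical item list after processing the event list p
def pvDictItems (p : List (Int × Bool)) : List (Int × String) :=
  (PySem.List.dedup (p.map Prod.fst)).map (fun k => (k, pvLabP p k))

-- A's action on one flagged event
def pvStepE (d : PySem.Dict Int String) (e : Int × Bool) : PySem.Dict Int String :=
  if e.2 then pvStepA_R d e.1 true else pvStepA_L d e.1 true

lemma pvStepA_L_false (d : PySem.Dict Int String) (k : Int) : pvStepA_L d k false = d := by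
  unfold pvStepA_L; split_ifs with h1 h2 <;> simp_all

lemma pvStepA_R_false (d : PySem.Dict Int String) (k : Int) : pvStepA_R d k false = d := by
  unfold pvStepA_R; split_ifs with h1 h2 <;> simp_all

-- A's per-tuple step is the fold of its flagged events
lemma pv_foldA_eq_foldE (l : List (Int × Int × Bool × Bool)) (d : PySem.Dict Int String) :
    l.foldl (fun d t => pvStepA_R (pvStepA_L d t.1 t.2.2.1) t.2.1 t.2.2.2) d
      = (pvTev l).foldl pvStepE d := by
  induction l generalizing d with
  | nil => rfl
  | cons t rest ih =>
    rw [List.foldl_cons]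
    rw [pvTev, List.flatMap_cons, List.foldl_append, ih]
    congr 1
    obtain ⟨a, b, fl, fr⟩ := t
    cases fl <;> cases fr <;>
      simp [pvEvts, pvStepE, pvStepA_L_false, pvStepA_R_false]

lemma pv_dedup_append_singleton (xs : List Int) (k : Int) :
    PySem.List.dedup (xs ++ [k])
      = if k ∈ xs then PySem.List.dedup xs else PySem.List.dedup xs ++ [k] := by
  rw [PySem.List.dedup_eq_ofList, PySem.List.dedup_eq_ofList,
      PySem.Set.ofList_eq_foldl, PySem.Set.ofList_eq_foldl, List.foldl_append]
  simp only [List.foldl_cons, List.foldl_nil]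
  rw [show (xs.foldl PySem.Set.add []) = PySem.Set.ofList xs from (PySem.Set.ofList_eq_foldl xs).symm]
  by_cases h : k ∈ xs
  · rw [if_pos h]
    simp [PySem.Set.add, PySem.Set.contains, h]
  · rw [if_neg h]
    simp [PySem.Set.add, PySem.Set.contains, h]

lemma pv_labP_append_ne (p : List (Int × Bool)) (e : Int × Bool) (j : Int) (h : j ≠ e.1) :
    pvLabP (p ++ [e]) j = pvLabP p j := by
  obtain ⟨k, s⟩ := e
  simp only [pvLabP, List.mem_append, List.mem_singleton, Prod.mk.injEq]
  simp only at h
  simp [h]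

lemma pv_keys_of_items {d : PySem.Dict Int String} {p : List (Int × Bool)}
    (h : d.items = pvDictItems p) : d.keys = PySem.List.dedup (p.map Prod.fst) := by
  simp only [PySem.Dict.keys, h, pvDictItems, List.map_map]
  exact List.map_id _

-- the single-event step preserves the canonical characterization
lemma pv_stepE_items (d : PySem.Dict Int String) (p : List (Int × Bool)) (e : Int × Bool)
    (h : d.items = pvDictItems p) : (pvStepE d e).items = pvDictItems (p ++ [e]) := by
  obtain ⟨k, side⟩ := e
  have hkeys : d.keys = PySem.List.dedup (p.map Prod.fst) := pv_keys_of_items h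
  have hnd : d.keys.Nodup := by rw [hkeys]; exact PySem.List.nodup_dedup _
  have hcont : d.contains k = decide (k ∈ p.map Prod.fst) := by
    rw [PySem.Dict.contains_eq_decide_mem_keys, hkeys]
    simp
  have hmapfst : (p ++ [(k, side)]).map Prod.fst = p.map Prod.fst ++ [k] := by simp
  by_cases hk : k ∈ p.map Prod.fst
  · -- key already present: A may upgrade in place, the order is unchanged
    have hco : d.contains k = true := by rw [hcont]; simp [hk]
    have hmem : (k, pvLabP p k) ∈ d.items := by
      rw [h]
      exact List.mem_map.mpr ⟨k, (PySem.List.mem_dedup _ _).mpr hk, rfl⟩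
    have hgD : d.getD k "" = pvLabP p k := PySem.Dict.getD_of_mem_items d hmem hnd ""
    have hded : PySem.List.dedup ((p ++ [(k, side)]).map Prod.fst)
        = PySem.List.dedup (p.map Prod.fst) := by
      rw [hmapfst, pv_dedup_append_singleton, if_pos hk]
    cases side with
    | false =>
      by_cases hkf : (k, false) ∈ p
      · -- label already contains L: A leaves the dict alone, labels unchanged
        have hne : ¬ (d.getD k "" = "R" ∧ true = true) := by
          rw [hgD]; by_cases hkt : (k, true) ∈ p <;> simp [pvLabP, hkf, hkt]
        have hstep : pvStepE d (k, false) = d := by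
          show pvStepA_L d k true = d
          unfold pvStepA_L
          rw [hco, if_neg (by simp), if_neg hne]
        rw [hstep, h, pvDictItems, pvDictItems, hded]
        apply List.map_congr_left
        intro j _
        by_cases hjk : j = k
        · subst hjk
          simp [pvLabP, List.mem_append, hkf]
        · rw [pv_labP_append_ne p (k, false) j hjk]
      · -- stored label is "R": A upgrades to "LR" in place
        have hkt : (k, true) ∈ p := by
          obtain ⟨pr, hpr, h1⟩ := List.mem_map.mp hk
          obtain ⟨k', s'⟩ := pr
          simp only at h1; subst h1
          cases s'
          · exact absurd hpr hkf
          · exact hpr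
        have hlab : pvLabP p k = "R" := by simp [pvLabP, hkf, hkt]
        have hstep : pvStepE d (k, false) = d.insert k "LR" := by
          show pvStepA_L d k true = d.insert k "LR"
          unfold pvStepA_L
          rw [hco, if_neg (by simp), if_pos ⟨by rw [hgD, hlab], rfl⟩]
        rw [hstep, PySem.Dict.items_insert_of_contains d "LR" hco, h,
            pvDictItems, pvDictItems, hded, List.map_map]
        apply List.map_congr_left
        intro j _
        by_cases hjk : j = k
        · subst hjk
          simp [Function.comp, pvLabP, List.mem_append, hkf, hkt]
        · rw [pv_labP_append_ne p (k, false) j hjk]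
          simp [Function.comp, hjk]
    | true =>
      by_cases hkt : (k, true) ∈ p
      · have hne : ¬ (d.getD k "" = "L" ∧ true = true) := by
          rw [hgD]; by_cases hkf : (k, false) ∈ p <;> simp [pvLabP, hkf, hkt]
        have hstep : pvStepE d (k, true) = d := by
          show pvStepA_R d k true = d
          unfold pvStepA_R
          rw [hco, if_neg (by simp), if_neg hne]
        rw [hstep, h, pvDictItems, pvDictItems, hded]
        apply List.map_congr_left
        intro j _
        by_cases hjk : j = k
        · subst hjk
          simp [pvLabP, List.mem_append, hkt]
        · rw [pv_labP_append_ne p (k, true) j hjk]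
      · have hkf : (k, false) ∈ p := by
          obtain ⟨pr, hpr, h1⟩ := List.mem_map.mp hk
          obtain ⟨k', s'⟩ := pr
          simp only at h1; subst h1
          cases s'
          · exact hpr
          · exact absurd hpr hkt
        have hlab : pvLabP p k = "L" := by simp [pvLabP, hkf, hkt]
        have hstep : pvStepE d (k, true) = d.insert k "LR" := by
          show pvStepA_R d k true = d.insert k "LR"
          unfold pvStepA_R
          rw [hco, if_neg (by simp), if_pos ⟨by rw [hgD, hlab], rfl⟩]
        rw [hstep, PySem.Dict.items_insert_of_contains d "LR" hco, h,
            pvDictItems, pvDictItems, hded, List.map_map]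
        apply List.map_congr_left
        intro j _
        by_cases hjk : j = k
        · subst hjk
          simp [Function.comp, pvLabP, List.mem_append, hkf, hkt]
        · rw [pv_labP_append_ne p (k, true) j hjk]
          simp [Function.comp, hjk]
  · -- fresh key: A appends it with its side's label
    have hco : d.contains k = false := by rw [hcont]; simp [hk]
    have hded : PySem.List.dedup ((p ++ [(k, side)]).map Prod.fst)
        = PySem.List.dedup (p.map Prod.fst) ++ [k] := by
      rw [hmapfst, pv_dedup_append_singleton, if_neg hk]
    have hnotf : ¬ (k, false) ∈ p := fun hm => hk (List.mem_map.mpr ⟨(k, false), hm, rfl⟩)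
    have hnott : ¬ (k, true) ∈ p := fun hm => hk (List.mem_map.mpr ⟨(k, true), hm, rfl⟩)
    have hcongr : ∀ j ∈ PySem.List.dedup (p.map Prod.fst),
        (j, pvLabP (p ++ [(k, side)]) j) = (j, pvLabP p j) := by
      intro j hj
      have hjk : j ≠ k := fun he => hk (he ▸ (PySem.List.mem_dedup _ _).mp hj)
      rw [pv_labP_append_ne p (k, side) j hjk]
    cases side with
    | false =>
      have hstep : pvStepE d (k, false) = d.insert k "L" := by
        show pvStepA_L d k true = d.insert k "L"
        unfold pvStepA_L
        rw [hco, if_pos rfl, if_pos rfl]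
      rw [hstep, PySem.Dict.items_insert_of_not_contains d "L" hco, h,
          pvDictItems, pvDictItems, hded, List.map_append]
      rw [List.map_congr_left hcongr]
      congr 1
      simp [pvLabP, List.mem_append, hnotf, hnott]
    | true =>
      have hstep : pvStepE d (k, true) = d.insert k "R" := by
        show pvStepA_R d k true = d.insert k "R"
        unfold pvStepA_R
        rw [hco, if_pos rfl, if_pos rfl]
      rw [hstep, PySem.Dict.items_insert_of_not_contains d "R" hco, h,
          pvDictItems, pvDictItems, hded, List.map_append]
      rw [List.map_congr_left hcongr]
      congr 1
      simp [pvLabP, List.mem_append, hnotf, hnott]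

lemma pv_foldE_items (es : List (Int × Bool)) (p : List (Int × Bool)) (d : PySem.Dict Int String)
    (h : d.items = pvDictItems p) : ((es.foldl pvStepE d).items) = pvDictItems (p ++ es) := by
  induction es generalizing p d with
  | nil => simpa using h
  | cons e rest ih =>
    rw [List.foldl_cons]
    have := ih (p ++ [e]) (pvStepE d e) (pv_stepE_items d p e h)
    simpa using this

-- membership of a left / right event in the event stream
lemma pv_mem_evts_false (t : Int × Int × Bool × Bool) (k : Int) :
    ((k, false) ∈ pvEvts t) ↔ (t.2.2.1 = true ∧ t.1 = k) := by
  obtain ⟨a, b, fl, fr⟩ := t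
  cases fl <;> cases fr <;> simp [pvEvts, eq_comm]

lemma pv_mem_evts_true (t : Int × Int × Bool × Bool) (k : Int) :
    ((k, true) ∈ pvEvts t) ↔ (t.2.2.2 = true ∧ t.2.1 = k) := by
  obtain ⟨a, b, fl, fr⟩ := t
  cases fl <;> cases fr <;> simp [pvEvts, eq_comm]

lemma pv_tev_fst (sub : List (Int × Int × Bool × Bool)) :
    (pvTev sub).map Prod.fst
      = sub.flatMap (fun t => (if t.2.2.1 then [t.1] else []) ++ (if t.2.2.2 then [t.2.1] else [])) := by
  induction sub with
  | nil => rfl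
  | cons t rest ih =>
    rw [pvTev, List.flatMap_cons, List.map_append, ← pvTev, ih, List.flatMap_cons]
    congr 1
    obtain ⟨a, b, fl, fr⟩ := t
    cases fl <;> cases fr <;> simp [pvEvts]

-- B's labels agree with the event-stream labels
lemma pv_label_eq (sub : List (Int × Int × Bool × Bool)) (k : Int) :
    pvLabP (pvTev sub) k
      = pvLabel (PySem.Set.ofList (sub.filterMap (fun t => if t.2.2.1 then some t.1 else none)))
                (PySem.Set.ofList (sub.filterMap (fun t => if t.2.2.2 then some t.2.1 else none))) k := by
  have hL : ((k, false) ∈ pvTev sub)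
      ↔ k ∈ sub.filterMap (fun t => if t.2.2.1 then some t.1 else none) := by
    simp only [pvTev, List.mem_flatMap, List.mem_filterMap]
    refine exists_congr fun t => and_congr_right fun _ => ?_
    rw [pv_mem_evts_false]
    obtain ⟨a, b, fl, fr⟩ := t
    cases fl <;> simp
  have hR : ((k, true) ∈ pvTev sub)
      ↔ k ∈ sub.filterMap (fun t => if t.2.2.2 then some t.2.1 else none) := by
    simp only [pvTev, List.mem_flatMap, List.mem_filterMap]
    refine exists_congr fun t => and_congr_right fun _ => ?_
    rw [pv_mem_evts_true]
    obtain ⟨a, b, fl, fr⟩ := t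
    cases fr <;> simp
  unfold pvLabP pvLabel
  by_cases h1 : (k, false) ∈ pvTev sub <;> by_cases h2 : (k, true) ∈ pvTev sub <;>
    simp [h1, h2, PySem.Set.contains, PySem.Set.mem_ofList, ← hL, ← hR]

-- one sublist: A's dict items are exactly B's derived list
lemma pv_sub_eq (sub : List (Int × Int × Bool × Bool)) :
    (sub.foldl (fun d t => pvStepA_R (pvStepA_L d t.1 t.2.2.1) t.2.1 t.2.2.2) PySem.Dict.empty).items
      = (PySem.List.dedup
          (sub.flatMap (fun t => (if t.2.2.1 then [t.1] else []) ++ (if t.2.2.2 then [t.2.1] else [])))).map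
          (fun k => (k,
            pvLabel (PySem.Set.ofList (sub.filterMap (fun t => if t.2.2.1 then some t.1 else none)))
                    (PySem.Set.ofList (sub.filterMap (fun t => if t.2.2.2 then some t.2.1 else none))) k)) := by
  rw [pv_foldA_eq_foldE]
  have h0 : (PySem.Dict.empty : PySem.Dict Int String).items = pvDictItems [] := by
    simp [PySem.Dict.empty, pvDictItems]
  rw [pv_foldE_items (pvTev sub) [] _ h0, List.nil_append, pvDictItems, pv_tev_fst]
  exact List.map_congr_left fun k _ => by rw [pv_label_eq]

lemma pv_keys_map_getD {ν β : Type} (d : PySem.Dict Int ν) (hnd : d.keys.Nodup)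
    (f : ν → β) (d0 : ν) :
    d.keys.map (fun k => f (d.getD k d0)) = d.values.map f := by
  simp only [PySem.Dict.keys, PySem.Dict.values, List.map_map]
  apply List.map_congr_left
  intro p hp
  have : d.getD p.1 d0 = p.2 :=
    PySem.Dict.getD_of_mem_items d (by exact (Prod.mk.eta (p := p)) ▸ hp) hnd d0
  simp [Function.comp, this]

-- ===== VERDICT (by name: the statement is the Claim_ definition above) =====
theorem KL_metki_spec : Claim_equal_KL_metki := by
  intro sp resize hdom hpre
  unfold Spec_KL_metki KL_metki KL_metki_alt
  have houter : ∀ (s : List (List (Int × Int × Bool × Bool))),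
      (List.map (fun d => d.items)
        (s.foldl (fun sd l =>
          sd ++ [l.foldl (fun d t => pvStepA_R (pvStepA_L d t.1 t.2.2.1) t.2.1 t.2.2.2) PySem.Dict.empty]) []))
      = s.map (fun sub =>
          (PySem.List.dedup
            (sub.flatMap (fun t => (if t.2.2.1 then [t.1] else []) ++ (if t.2.2.2 then [t.2.1] else [])))).map
            (fun k => (k,
              pvLabel (PySem.Set.ofList (sub.filterMap (fun t => if t.2.2.1 then some t.1 else none)))
                      (PySem.Set.ofList (sub.filterMap (fun t => if t.2.2.2 then some t.2.1 else none))) k))) := by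
    intro s
    rw [PySem.List.foldl_append_singleton_eq_map, List.nil_append, List.map_map]
    exact List.map_congr_left (fun l _ => pv_sub_eq l)
  cases resize with
  | none => exact (houter sp).symm ▸ rfl
  | some rl =>
    have hseq :
        (PySem.Dict.ofList rl).keys.foldl (fun s k =>
            s ++ [((PySem.Dict.ofList rl).getD k []).foldl
              (fun si j => si ++ (PySem.List.pyGet? sp j).getD []) []]) []
        = (PySem.Dict.ofList rl).values.map
            (fun js => js.flatMap (fun j => (PySem.List.pyGet? sp j).getD [])) := by
      rw [PySem.List.foldl_append_singleton_eq_map, List.nil_append]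
      have hin : ∀ k ∈ (PySem.Dict.ofList rl).keys,
          ((PySem.Dict.ofList rl).getD k []).foldl
              (fun si j => si ++ (PySem.List.pyGet? sp j).getD []) []
            = ((PySem.Dict.ofList rl).getD k []).flatMap
                (fun j => (PySem.List.pyGet? sp j).getD []) := by
        intro k _
        rw [PySem.List.foldl_append_eq_flatMap, List.nil_append]
      rw [List.map_congr_left hin]
      exact pv_keys_map_getD _ (PySem.Dict.nodup_keys_ofList rl)
        (fun js => js.flatMap (fun j => (PySem.List.pyGet? sp j).getD [])) []
    show List.map (fun d => d.items)
        (((PySem.Dict.ofList rl).keys.foldl (fun s k =>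
            s ++ [((PySem.Dict.ofList rl).getD k []).foldl
              (fun si j => si ++ (PySem.List.pyGet? sp j).getD []) []]) []).foldl
          (fun sd l =>
            sd ++ [l.foldl (fun d t => pvStepA_R (pvStepA_L d t.1 t.2.2.1) t.2.1 t.2.2.2)
              PySem.Dict.empty]) [])
      = ((PySem.Dict.ofList rl).values.map
            (fun js => js.flatMap (fun j => (PySem.List.pyGet? sp j).getD []))).map
          (fun sub =>
            (PySem.List.dedup
              (sub.flatMap (fun t => (if t.2.2.1 then [t.1] else []) ++ (if t.2.2.2 then [t.2.1] else [])))).map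
              (fun k => (k,
                pvLabel (PySem.Set.ofList (sub.filterMap (fun t => if t.2.2.1 then some t.1 else none)))
                        (PySem.Set.ofList (sub.filterMap (fun t => if t.2.2.2 then some t.2.1 else none))) k)))
    rw [hseq]
    exact houter _
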